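-- pv_equiv track=rewrite | github.com/nickchen111/Leetcode | Dynamic_Programming/3891. Minimum Increase to Maximize Special Indices.py | minIncrease
-- ===== SOURCE A (Python) =====
-- def minIncrease(nums: list[int]) -> int:
--     n = len(nums)
--     dp = [(0, 0)] * n
--
--     for i in range(1, n - 1):
--         res_no = dp[i-1]
--         cur_cost = max(0, nums[i-1] - nums[i] + 1, nums[i+1] - nums[i] + 1)
--         prev_cnt, prev_cost = dp[i-2] if i >= 2 else (0, 0)
--         res_yes = (prev_cnt - 1, prev_cost + cur_cost)
--         dp[i] = min(res_no, res_yes)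
--
--     return dp[n-2][1]
-- ===== SOURCE B (Python) =====
-- def minIncrease(nums: list[int]) -> int:
--     # The DP in A maximizes the number of chosen non-adjacent interior indices
--     # (that maximum is fixed: ceil(m/2) for m = n-2 candidates) and, among maximum
--     # selections, minimizes total cost.  For odd m the maximum selection is unique
--     # (positions 1,3,...,m); for even m the maximum selections are exactly
--     # "odd positions up to 2j-1, then even positions 2j+2,...,m" for j = 0..m/2,
--     # so the answer is a min over one split point, computed with running sums.
--     n = len(nums)
--     c = [max(0, nums[i - 1] - nums[i] + 1, nums[i + 1] - nums[i] + 1) for i in range(1, n - 1)]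
--     m = len(c)
--     pre = sum(c[k] for k in range(0, m, 2))
--     if m % 2 == 1:
--         return pre
--     best = pre
--     suf = 0
--     for j in range(m // 2 - 1, -1, -1):
--         pre -= c[2 * j]
--         suf += c[2 * j + 1]
--         best = min(best, pre + suf)
--     return best
-- ===== Notes on version B (the rewrite author's own statement) =====
-- stated objective: alternative
-- what changed: Replaces A's (count,cost) tuple DP entirely: B observes that the DP always selects a maximum set of non-adjacent interior indices, whose shape is 'odd positions up to a split point, then even positions', so it computes the per-index costs once and takes a min over split points with running prefix/suffix sums (no tuples, no lexicographic tuple-min).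
-- outside the precondition, e.g. on minIncrease([]): A raises IndexError, B returns 0
import Mathlib
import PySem

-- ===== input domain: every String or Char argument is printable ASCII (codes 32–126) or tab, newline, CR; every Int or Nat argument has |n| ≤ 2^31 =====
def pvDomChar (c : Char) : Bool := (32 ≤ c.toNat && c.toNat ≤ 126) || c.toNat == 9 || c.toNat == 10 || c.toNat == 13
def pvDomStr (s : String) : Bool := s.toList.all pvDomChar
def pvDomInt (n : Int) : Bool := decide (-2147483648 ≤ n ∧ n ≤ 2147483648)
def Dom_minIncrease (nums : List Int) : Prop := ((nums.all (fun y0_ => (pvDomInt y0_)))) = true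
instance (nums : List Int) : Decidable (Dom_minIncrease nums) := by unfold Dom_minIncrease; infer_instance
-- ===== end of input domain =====

-- B replaces A's (count, cost) tuple DP by a closed-form analysis of the maximum selections
-- (odd positions up to a split point, then even positions), computed with running prefix/suffix
-- sums; on nums = [], excluded by Pre_, A raises IndexError while B returns 0.

-- Python's min of two tuples: first argument wins on a lexicographic tie.
def pyMinPair (a b : Int × Int) : Int × Int :=
  if a.1 < b.1 ∨ (a.1 = b.1 ∧ a.2 ≤ b.2) then a else b

-- ===== PORT A =====
-- dp[i] = … is ported as List.set; pyGet? is none exactly where Python's indexing raises.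
-- Inside the loop i ∈ [1, n-2], so every .getD default is unreachable; the final dp[n-2]
-- (Python negative indexing for n = 1) is out of range only for nums = [], excluded by Pre_.
def minIncreaseAStep (nums : List Int) (dp : List (Int × Int)) (i : Int) : List (Int × Int) :=
  let res_no := (PySem.List.pyGet? dp (i - 1)).getD (0, 0)
  let cur_cost := max 0 (max ((PySem.List.pyGet? nums (i - 1)).getD 0 - (PySem.List.pyGet? nums i).getD 0 + 1)
                            ((PySem.List.pyGet? nums (i + 1)).getD 0 - (PySem.List.pyGet? nums i).getD 0 + 1))
  let prev := if 2 ≤ i then (PySem.List.pyGet? dp (i - 2)).getD (0, 0) else ((0 : Int), (0 : Int))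
  let res_yes := (prev.1 - 1, prev.2 + cur_cost)
  dp.set i.toNat (pyMinPair res_no res_yes)

def minIncrease (nums : List Int) : Int :=
  let n : Int := (nums.length : Int)
  let dp : List (Int × Int) := List.replicate nums.length ((0 : Int), (0 : Int))
  let dp := (PySem.List.pyRange 1 (n - 1) 1).foldl (minIncreaseAStep nums) dp
  ((PySem.List.pyGet? dp (n - 2)).getD (0, 0)).2

-- ===== PORT B =====
-- the comprehension building c; pyGet? indices are in range inside it
def bCosts (nums : List Int) : List Int :=
  (PySem.List.pyRange 1 ((nums.length : Int) - 1) 1).map (fun i =>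
    max 0 (max ((PySem.List.pyGet? nums (i - 1)).getD 0 - (PySem.List.pyGet? nums i).getD 0 + 1)
               ((PySem.List.pyGet? nums (i + 1)).getD 0 - (PySem.List.pyGet? nums i).getD 0 + 1)))

-- loop body: state (pre, suf, best)
def minIncreaseBStep (c : List Int) (st : Int × Int × Int) (j : Int) : Int × Int × Int :=
  let pre := st.1 - (PySem.List.pyGet? c (2 * j)).getD 0
  let suf := st.2.1 + (PySem.List.pyGet? c (2 * j + 1)).getD 0
  (pre, suf, min st.2.2 (pre + suf))

def minIncrease_alt (nums : List Int) : Int :=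
  let c := bCosts nums
  let m : Int := (c.length : Int)
  let pre := ((PySem.List.pyRange 0 m 2).map (fun k => (PySem.List.pyGet? c k).getD 0)).sum
  if PySem.Int.mod m 2 = 1 then pre
  else
    let st := (PySem.List.pyRange (PySem.Int.floordiv m 2 - 1) (-1) (-1)).foldl
      (minIncreaseBStep c) (pre, 0, pre)
    st.2.2

-- ===== PRECONDITION & SPEC =====
-- Python A raises IndexError (dp[-2] on the empty dp) exactly when nums = [].
def Pre_minIncrease (nums : List Int) : Prop := nums ≠ []
instance (nums : List Int) : Decidable (Pre_minIncrease nums) := by unfold Pre_minIncrease; infer_instance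
def pvWitness_minIncrease : List Int := [2, 0, 2]

def Spec_minIncrease (nums : List Int) (out : Int) : Prop := out = minIncrease_alt nums
instance (nums : List Int) (out : Int) : Decidable (Spec_minIncrease nums out) := by unfold Spec_minIncrease; infer_instance

-- ===== CLAIM (what is proved, stated in full; the proofs are below) =====
def Claim_equal_minIncrease : Prop := ∀ (nums : List Int), Dom_minIncrease nums → Pre_minIncrease nums → Spec_minIncrease nums (minIncrease nums)

-- ===== LEMMAS AND PROOFS =====

-- The abstract recurrence A computes: fold the per-index costs through the two-state step.
def miStep (st : (Int × Int) × (Int × Int)) (c : Int) : (Int × Int) × (Int × Int) :=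
  (st.2, pyMinPair st.2 (st.1.1 - 1, st.1.2 + c))

def miCost (nums : List Int) (k : Nat) : Int :=
  max 0 (max (nums.getD k 0 - nums.getD (k + 1) 0 + 1) (nums.getD (k + 2) 0 - nums.getD (k + 1) 0 + 1))

def miRun (nums : List Int) (k : Nat) : (Int × Int) × (Int × Int) :=
  ((List.range k).map (miCost nums)).foldl miStep ((0, 0), (0, 0))

theorem miRun_succ (nums : List Int) (k : Nat) :
    miRun nums (k + 1) = miStep (miRun nums k) (miCost nums k) := by
  unfold miRun
  rw [List.range_succ, List.map_append, List.foldl_append]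
  rfl

theorem mi_a_inv (nums : List Int) :
    ∀ k : Nat, k ≤ nums.length - 2 →
      ((PySem.List.pyRange 1 (1 + (k : Int)) 1).foldl (minIncreaseAStep nums)
          (List.replicate nums.length ((0:Int),(0:Int)))).length = nums.length ∧
      ((PySem.List.pyRange 1 (1 + (k : Int)) 1).foldl (minIncreaseAStep nums)
          (List.replicate nums.length ((0:Int),(0:Int)))).getD k ((0:Int),(0:Int)) = (miRun nums k).2 ∧
      ((PySem.List.pyRange 1 (1 + (k : Int)) 1).foldl (minIncreaseAStep nums)
          (List.replicate nums.length ((0:Int),(0:Int)))).getD (k - 1) ((0:Int),(0:Int)) = (miRun nums k).1 := by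
  intro k
  induction k with
  | zero =>
    intro _
    rw [show ((1 : Int) + ((0 : Nat) : Int)) = 1 by norm_num,
        PySem.List.pyRange_one_eq_nil (by omega)]
    simp [miRun, List.getD]
  | succ k IH =>
    intro hk
    obtain ⟨hlen, h2, h1⟩ := IH (by omega)
    have hrange : PySem.List.pyRange 1 (1 + ((k + 1 : Nat) : Int)) 1 =
        PySem.List.pyRange 1 (1 + (k : Int)) 1 ++ [1 + (k : Int)] := by
      have : ((1 : Int) + ((k + 1 : Nat) : Int)) = (1 + (k : Int)) + 1 := by omega
      rw [this, PySem.List.pyRange_one_succ_right (by omega)]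
    rw [hrange, List.foldl_append]
    set dpk := (PySem.List.pyRange 1 (1 + (k : Int)) 1).foldl (minIncreaseAStep nums)
        (List.replicate nums.length ((0:Int),(0:Int))) with hdpk
    have hkn : k + 2 < nums.length := by omega
    have e0 : (1:Int) + (k:Int) - 1 = ((k : Nat) : Int) := by omega
    have e1 : (1:Int) + (k:Int) = ((k + 1 : Nat) : Int) := by omega
    have e2 : (1:Int) + (k:Int) + 1 = ((k + 2 : Nat) : Int) := by omega
    have etn : ((1:Int) + (k:Int)).toNat = k + 1 := by omega
    have hstep : minIncreaseAStep nums dpk (1 + (k:Int)) =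
        dpk.set (k + 1) ((miRun nums (k+1)).2) := by
      unfold minIncreaseAStep
      rw [miRun_succ]
      have hres_no : (PySem.List.pyGet? dpk ((1:Int) + (k:Int) - 1)).getD (0,0) = (miRun nums k).2 := by
        rw [e0, PySem.List.pyGet?_natCast]
        simpa [List.getD] using h2
      have hprev : (if (2:Int) ≤ 1 + (k:Int) then
            (PySem.List.pyGet? dpk ((1:Int) + (k:Int) - 2)).getD (0,0) else ((0:Int),(0:Int)))
          = (miRun nums k).1 := by
        cases k with
        | zero => simp [miRun]
        | succ j =>
          rw [if_pos (by push_cast; omega)]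
          have e3 : (1:Int) + ((j+1 : Nat) : Int) - 2 = ((j : Nat) : Int) := by omega
          rw [e3, PySem.List.pyGet?_natCast]
          simpa [List.getD] using h1
      have hcost : max 0 (max ((PySem.List.pyGet? nums ((1:Int) + (k:Int) - 1)).getD 0 -
            (PySem.List.pyGet? nums ((1:Int) + (k:Int))).getD 0 + 1)
            ((PySem.List.pyGet? nums ((1:Int) + (k:Int) + 1)).getD 0 -
            (PySem.List.pyGet? nums ((1:Int) + (k:Int))).getD 0 + 1)) = miCost nums k := by
        rw [e2, e0, e1, PySem.List.pyGet?_natCast, PySem.List.pyGet?_natCast,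
            PySem.List.pyGet?_natCast]
        simp [miCost, List.getD]
      rw [etn]
      simp only [hres_no, hprev, hcost, miStep]
    simp only [List.foldl_cons, List.foldl_nil]
    rw [hstep]
    refine ⟨by simpa using hlen, ?_, ?_⟩
    · rw [List.getD_eq_getElem?_getD, List.getElem?_set_self (by omega)]
      rfl
    · rw [miRun_succ]
      show (dpk.set (k+1) _).getD k _ = (miRun nums k).2
      rw [List.getD_eq_getElem?_getD, List.getElem?_set_ne (by omega)]
      simpa [List.getD] using h2

theorem mi_a_eq (nums : List Int) (h : nums ≠ []) :
    minIncrease nums = (miRun nums (nums.length - 2)).2.2 := by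
  rcases Nat.lt_or_ge nums.length 2 with h1 | h2
  · -- nums = [x]
    rcases nums with _ | ⟨x, tail⟩
    · exact absurd rfl h
    · rcases tail with _ | ⟨y, t⟩
      · rfl
      · simp at h1
  · -- nums.length ≥ 2
    obtain ⟨hlen, hget, -⟩ := mi_a_inv nums (nums.length - 2) le_rfl
    have hdef : minIncrease nums = ((PySem.List.pyGet?
        ((PySem.List.pyRange 1 ((nums.length : Int) - 1) 1).foldl (minIncreaseAStep nums)
          (List.replicate nums.length ((0:Int),(0:Int)))) ((nums.length : Int) - 2)).getD (0,0)).2 := rfl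
    rw [hdef]
    have eb : ((nums.length : Int)) - 1 = 1 + ((nums.length - 2 : Nat) : Int) := by omega
    have ei : ((nums.length : Int)) - 2 = ((nums.length - 2 : Nat) : Int) := by omega
    rw [eb, ei, PySem.List.pyGet?_natCast]
    rw [List.getElem?_eq_getElem (by rw [hlen]; omega), Option.getD_some]
    rw [List.getD_eq_getElem?_getD, List.getElem?_eq_getElem (by rw [hlen]; omega),
        Option.getD_some] at hget
    rw [hget]

-- ---- characterisation of the DP value: maximum count is forced, cost follows FF ----

-- number of chosen indices among the first k candidates in any maximum selection: ceil(k/2)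
def miCnt (k : Nat) : Nat := (k + 1) / 2

-- the cost of the optimum over the first k candidates
def FF (nums : List Int) : Nat → Int
  | 0 => 0
  | 1 => miCost nums 0
  | (k + 2) => if k % 2 = 1 then FF nums k + miCost nums (k + 1)
               else min (FF nums (k + 1)) (FF nums k + miCost nums (k + 1))

theorem FF_step (nums : List Int) (k : Nat) :
    FF nums (k + 2) = if k % 2 = 1 then FF nums k + miCost nums (k + 1)
      else min (FF nums (k + 1)) (FF nums k + miCost nums (k + 1)) := rfl

theorem miRun_char (nums : List Int) : ∀ k : Nat,
    miRun nums k = ((if k = 0 then ((0:Int),(0:Int)) else (-(miCnt (k-1) : Int), FF nums (k-1))),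
                    (-(miCnt k : Int), FF nums k)) := by
  intro k
  induction k with
  | zero => simp [miRun, miCnt, FF]
  | succ k IH =>
    rw [miRun_succ, IH]
    unfold miStep
    simp only [Nat.add_sub_cancel, Nat.succ_ne_zero, if_false]
    refine Prod.ext rfl ?_
    cases k with
    | zero =>
      show pyMinPair (-(miCnt 0 : Int), FF nums 0) (0 - 1, 0 + miCost nums 0) = _
      unfold pyMinPair
      have hne : ¬ ((-(miCnt 0 : Int), FF nums 0).1 < ((0:Int) - 1, 0 + miCost nums 0).1 ∨
          ((-(miCnt 0 : Int), FF nums 0).1 = ((0:Int) - 1, 0 + miCost nums 0).1 ∧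
           (-(miCnt 0 : Int), FF nums 0).2 ≤ ((0:Int) - 1, 0 + miCost nums 0).2)) := by
        intro hcon
        rcases hcon with h1 | h2
        · simp only [miCnt] at h1; omega
        · have := h2.1; simp only [miCnt] at this; omega
      rw [if_neg hne]
      have e1 : (0 : Int) - 1 = -(miCnt 1 : Int) := by simp [miCnt]
      have e2 : 0 + miCost nums 0 = FF nums 1 := by simp [FF]
      rw [e1, e2]
    | succ j =>
      show pyMinPair (-(miCnt (j+1) : Int), FF nums (j+1))
            (-(miCnt j : Int) - 1, FF nums j + miCost nums (j+1)) = _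
      rcases Nat.mod_two_eq_zero_or_one j with hj | hj
      · -- j even: tie on counts, min on cost; FF (j+2) takes the min branch
        have hc1 : -(miCnt (j+1) : Int) = -(miCnt j : Int) - 1 := by
          simp only [miCnt]; omega
        have hc2 : -(miCnt (j+2) : Int) = -(miCnt (j+1) : Int) := by
          simp only [miCnt]; omega
        have hFF : FF nums (j+2) = min (FF nums (j+1)) (FF nums j + miCost nums (j+1)) := by
          rw [FF_step, if_neg (by omega)]
        unfold pyMinPair
        by_cases h : FF nums (j+1) ≤ FF nums j + miCost nums (j+1)
        · rw [if_pos (Or.inr ⟨hc1, h⟩)]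
          rw [hFF, min_eq_left h, hc2, hc1]
        · have hne : ¬ ((-(miCnt (j+1) : Int), FF nums (j+1)).1 < (-(miCnt j : Int) - 1, FF nums j + miCost nums (j+1)).1 ∨
              ((-(miCnt (j+1) : Int), FF nums (j+1)).1 = (-(miCnt j : Int) - 1, FF nums j + miCost nums (j+1)).1 ∧
               (-(miCnt (j+1) : Int), FF nums (j+1)).2 ≤ (-(miCnt j : Int) - 1, FF nums j + miCost nums (j+1)).2)) := by
            intro hcon
            rcases hcon with h1 | h2
            · simp only at h1; omega
            · exact h h2.2
          rw [if_neg hne, hFF, min_eq_right (not_le.mp h).le, hc2, hc1]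
      · -- j odd: taking wins strictly; FF (j+2) = FF j + cost
        have hlt : ¬ (-(miCnt (j+1) : Int) < -(miCnt j : Int) - 1) := by
          simp only [miCnt]; omega
        have heq : ¬ (-(miCnt (j+1) : Int) = -(miCnt j : Int) - 1) := by
          simp only [miCnt]; omega
        have hFF : FF nums (j+2) = FF nums j + miCost nums (j+1) := by
          rw [FF_step, if_pos hj]
        have hc : -(miCnt j : Int) - 1 = -(miCnt (j+2) : Int) := by
          simp only [miCnt]; omega
        unfold pyMinPair
        have hne : ¬ ((-(miCnt (j+1) : Int), FF nums (j+1)).1 < (-(miCnt j : Int) - 1, FF nums j + miCost nums (j+1)).1 ∨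
            ((-(miCnt (j+1) : Int), FF nums (j+1)).1 = (-(miCnt j : Int) - 1, FF nums j + miCost nums (j+1)).1 ∧
             (-(miCnt (j+1) : Int), FF nums (j+1)).2 ≤ (-(miCnt j : Int) - 1, FF nums j + miCost nums (j+1)).2)) := by
          intro hcon
          rcases hcon with h1 | h2
          · exact hlt h1
          · exact heq h2.1
        rw [if_neg hne, hFF, hc]

theorem mi_a_FF (nums : List Int) (h : nums ≠ []) :
    minIncrease nums = FF nums (nums.length - 2) := by
  rw [mi_a_eq nums h, miRun_char]

-- ---- B-side abstractions ----

def oddPre (nums : List Int) (j : Nat) : Int :=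
  ((List.range j).map (fun i => miCost nums (2 * i))).sum

def evenSuf (nums : List Int) (T j : Nat) : Int :=
  ((List.range (T - j)).map (fun i => miCost nums (2 * (j + i) + 1))).sum

def VV (nums : List Int) (T j : Nat) : Int := oddPre nums j + evenSuf nums T j

def UU (nums : List Int) (T : Nat) : Nat → Int
  | 0 => VV nums T 0
  | (j + 1) => min (UU nums T j) (VV nums T (j + 1))

theorem oddPre_succ (nums : List Int) (j : Nat) :
    oddPre nums (j + 1) = oddPre nums j + miCost nums (2 * j) := by
  simp [oddPre, List.range_succ]

theorem evenSuf_self (nums : List Int) (T : Nat) : evenSuf nums T T = 0 := by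
  simp [evenSuf]

theorem evenSuf_down (nums : List Int) (T j : Nat) (h : j < T) :
    evenSuf nums T j = miCost nums (2 * j + 1) + evenSuf nums T (j + 1) := by
  unfold evenSuf
  rw [show T - j = (T - (j + 1)) + 1 by omega, List.range_succ_eq_map]
  rw [List.map_cons, List.map_map, List.sum_cons]
  congr 1
  apply congrArg List.sum
  apply List.map_congr_left
  intro i _
  show miCost nums (2 * (j + (i + 1)) + 1) = miCost nums (2 * (j + 1 + i) + 1)
  congr 1
  omega

theorem FF_odd (nums : List Int) : ∀ s : Nat, FF nums (2 * s + 1) = oddPre nums (s + 1) := by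
  intro s
  induction s with
  | zero => simp [FF, oddPre]
  | succ s IH =>
    have e : 2 * (s + 1) + 1 = (2 * s + 1) + 2 := by omega
    rw [e, FF_step, if_pos (by omega), IH]
    rw [show 2 * s + 1 + 1 = 2 * (s + 1) by omega, ← oddPre_succ]

theorem VV_shift (nums : List Int) (T j : Nat) (h : j ≤ T) :
    VV nums (T + 1) j = VV nums T j + miCost nums (2 * T + 1) := by
  unfold VV
  have : evenSuf nums (T + 1) j = evenSuf nums T j + miCost nums (2 * T + 1) := by
    unfold evenSuf
    rw [show T + 1 - j = (T - j) + 1 by omega, List.range_succ, List.map_append, List.sum_append]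
    simp [show 2 * (j + (T - j)) + 1 = 2 * T + 1 by omega]
  rw [this]; ring

theorem UU_shift (nums : List Int) (T : Nat) : ∀ j : Nat, j ≤ T →
    UU nums (T + 1) j = UU nums T j + miCost nums (2 * T + 1) := by
  intro j
  induction j with
  | zero => intro _; show VV nums (T+1) 0 = VV nums T 0 + _; exact VV_shift nums T 0 (by omega)
  | succ j IH =>
    intro hj
    show min (UU nums (T+1) j) (VV nums (T+1) (j+1)) = min (UU nums T j) (VV nums T (j+1)) + _
    rw [IH (by omega), VV_shift nums T (j+1) hj, min_add_add_right]

theorem FF_even (nums : List Int) : ∀ T : Nat, FF nums (2 * T) = UU nums T T := by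
  intro T
  induction T with
  | zero => simp [FF, UU, VV, oddPre, evenSuf]
  | succ T IH =>
    have e : 2 * (T + 1) = (2 * T) + 2 := by omega
    rw [e, FF_step, if_neg (by omega), IH]
    have h1 : FF nums (2 * T + 1) = VV nums (T + 1) (T + 1) := by
      rw [FF_odd, VV, evenSuf_self, add_zero]
    rw [h1, ← UU_shift nums T T le_rfl]
    show min (VV nums (T+1) (T+1)) (UU nums (T+1) T) = UU nums (T+1) (T+1)
    rw [min_comm]; rfl

-- ---- connecting B's port to the abstractions ----

theorem bCosts_eq (nums : List Int) :
    bCosts nums = (List.range (nums.length - 2)).map (miCost nums) := by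
  unfold bCosts
  rw [PySem.List.pyRange_one, List.map_map,
      show ((nums.length : Int) - 1 - 1).toNat = nums.length - 2 by omega]
  apply List.map_congr_left
  intro k _
  show max 0 (max ((PySem.List.pyGet? nums ((1:Int) + (k:Int) - 1)).getD 0 -
        (PySem.List.pyGet? nums ((1:Int) + (k:Int))).getD 0 + 1)
        ((PySem.List.pyGet? nums ((1:Int) + (k:Int) + 1)).getD 0 -
        (PySem.List.pyGet? nums ((1:Int) + (k:Int))).getD 0 + 1)) = miCost nums k
  rw [show (1:Int) + (k:Int) - 1 = ((k : Nat) : Int) by omega,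
      show (1:Int) + (k:Int) = (((k+1) : Nat) : Int) by omega,
      show (((k+1) : Nat) : Int) + 1 = (((k+2) : Nat) : Int) by omega,
      PySem.List.pyGet?_natCast, PySem.List.pyGet?_natCast, PySem.List.pyGet?_natCast]
  simp [miCost, List.getD_eq_getElem?_getD]

theorem bCosts_len (nums : List Int) : (bCosts nums).length = nums.length - 2 := by
  rw [bCosts_eq]; simp

theorem bCosts_get (nums : List Int) (k : Nat) (h : k < nums.length - 2) :
    (PySem.List.pyGet? (bCosts nums) ((k : Nat) : Int)).getD 0 = miCost nums k := by
  rw [PySem.List.pyGet?_natCast, bCosts_eq,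
      List.getElem?_eq_getElem (by simpa using h)]
  simp

theorem pre_eq (nums : List Int) :
    ((PySem.List.pyRange 0 (((nums.length - 2 : Nat) : Int)) 2).map
      (fun k => (PySem.List.pyGet? (bCosts nums) k).getD 0)).sum
    = oddPre nums ((nums.length - 2 + 1) / 2) := by
  rw [PySem.List.pyRange_of_pos _ _ (by norm_num)]
  rw [show (if (0:Int) < ((nums.length - 2 : Nat) : Int)
        then ((((nums.length - 2 : Nat) : Int) - 0 + 2 - 1) / 2).toNat else 0)
      = (nums.length - 2 + 1) / 2 by split <;> omega]
  rw [List.map_map]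
  unfold oddPre
  apply congrArg List.sum
  apply List.map_congr_left
  intro k hk
  show (PySem.List.pyGet? (bCosts nums) (0 + 2 * (k : Int))).getD 0 = miCost nums (2 * k)
  rw [show (0:Int) + 2 * (k : Int) = ((2 * k : Nat) : Int) by push_cast; ring]
  exact bCosts_get nums (2 * k) (by simp at hk; omega)

theorem loop_inv (nums : List Int) (T : Nat) (hT : 2 * T ≤ nums.length - 2) :
    ∀ j : Nat, j ≤ T → ∀ b : Int,
      (PySem.List.pyRange ((j : Int) - 1) (-1) (-1)).foldl (minIncreaseBStep (bCosts nums))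
        (oddPre nums j, evenSuf nums T j, b)
      = (oddPre nums 0, evenSuf nums T 0,
          if j = 0 then b else min b (UU nums T (j - 1))) := by
  intro j
  induction j with
  | zero =>
    intro _ b
    rw [show ((0:Nat):Int) - 1 = -1 by norm_num, PySem.List.pyRange_neg_one_eq_nil le_rfl]
    simp [oddPre]
  | succ j IH =>
    intro hj b
    rw [show (((j+1):Nat):Int) - 1 = (j:Int) by push_cast; ring,
        PySem.List.pyRange_neg_one_cons (by omega), List.foldl_cons]
    have hstep : minIncreaseBStep (bCosts nums)
        (oddPre nums (j+1), evenSuf nums T (j+1), b) (j : Int)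
        = (oddPre nums j, evenSuf nums T j, min b (VV nums T j)) := by
      unfold minIncreaseBStep
      rw [show 2 * (j:Int) = ((2*j : Nat) : Int) by push_cast; ring,
          show ((2*j : Nat) : Int) + 1 = ((2*j+1 : Nat) : Int) by push_cast; ring,
          bCosts_get nums (2*j) (by omega), bCosts_get nums (2*j+1) (by omega)]
      have hpre : oddPre nums (j+1) - miCost nums (2*j) = oddPre nums j := by
        rw [oddPre_succ]; ring
      have hsuf : evenSuf nums T (j+1) + miCost nums (2*j+1) = evenSuf nums T j := by
        rw [evenSuf_down nums T j (by omega)]; ring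
      simp only [hpre, hsuf]
      rfl
    rw [hstep, IH (by omega) (min b (VV nums T j))]
    refine Prod.ext rfl (Prod.ext rfl ?_)
    show (if j = 0 then min b (VV nums T j) else min (min b (VV nums T j)) (UU nums T (j-1)))
        = min b (UU nums T j)
    cases j with
    | zero => rfl
    | succ i =>
      simp only [Nat.succ_ne_zero, if_false, Nat.add_sub_cancel]
      rw [min_assoc]
      show min b (min (VV nums T (i+1)) (UU nums T i)) = min b (min (UU nums T i) (VV nums T (i+1)))
      rw [min_comm (VV nums T (i+1))]

theorem mi_b_FF (nums : List Int) :
    minIncrease_alt nums = FF nums (nums.length - 2) := by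
  have hlen : (((bCosts nums).length : Nat) : Int) = ((nums.length - 2 : Nat) : Int) := by
    rw [bCosts_len]
  unfold minIncrease_alt
  simp only [hlen]
  have hmod : PySem.Int.mod (((nums.length - 2 : Nat)) : Int) 2 = (((nums.length - 2) % 2 : Nat) : Int) := by
    exact_mod_cast PySem.Int.mod_natCast (nums.length - 2) 2
  have hdiv : PySem.Int.floordiv (((nums.length - 2 : Nat)) : Int) 2 = (((nums.length - 2) / 2 : Nat) : Int) := by
    exact_mod_cast PySem.Int.floordiv_natCast (nums.length - 2) 2
  rw [hmod, pre_eq]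
  rcases Nat.mod_two_eq_zero_or_one (nums.length - 2) with hpar | hpar
  · -- even number of candidates: the split-point loop
    rw [if_neg (by rw [hpar]; exact fun h => by simp at h)]
    rw [hdiv]
    set T := (nums.length - 2) / 2 with hT
    have hM : 2 * T = nums.length - 2 := by omega
    have hpre : (nums.length - 2 + 1) / 2 = T := by omega
    rw [hpre]
    have hstate : (oddPre nums T, (0:Int), oddPre nums T)
        = (oddPre nums T, evenSuf nums T T, oddPre nums T) := by
      rw [evenSuf_self]
    rw [hstate, loop_inv nums T (by omega) T le_rfl]
    rw [← hM, FF_even]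
    cases T with
    | zero => simp [UU, VV, oddPre, evenSuf]
    | succ t =>
      simp only [Nat.succ_ne_zero, if_false, Nat.add_sub_cancel]
      have hVV : oddPre nums (t+1) = VV nums (t+1) (t+1) := by
        rw [VV, evenSuf_self, add_zero]
      rw [hVV]
      show min (VV nums (t+1) (t+1)) (UU nums (t+1) t) = min (UU nums (t+1) t) (VV nums (t+1) (t+1))
      rw [min_comm]
  · -- odd number of candidates: the odd-position sum is the answer
    rw [if_pos (by rw [hpar]; rfl)]
    obtain ⟨s, hs⟩ : ∃ s, nums.length - 2 = 2 * s + 1 := ⟨(nums.length - 2) / 2, by omega⟩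
    rw [hs, show (2 * s + 1 + 1) / 2 = s + 1 by omega, ← FF_odd]

-- ===== VERDICT (by name: the statement is the Claim_ definition above) =====
theorem minIncrease_spec : Claim_equal_minIncrease := by
  intro nums _ hpre
  unfold Spec_minIncrease
  rw [mi_a_FF nums hpre, mi_b_FF]
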